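-- pv_equiv track=rewrite | github.com/glitchkyle/algorithms-and-data-structures | problems/school/cs515/assignment2/double_knapsack.py | func
-- ===== SOURCE A (Python) =====
-- def func(profits, weights, capacities):
--     """
--     Problem 1
--     O(i*j*k), i = len(pj), j = c1, k = c2
--
--     Double Knapsack Problem: Given a set of n items and 2 knapsacks, with
--
--     pj: profit of item j
--     wj: weight of item j
--     c1: capacity of the first knapsack
--     c2: capacity of the second knapsack
--
--     select m disjoint subsets of items so that the total profit of the selected items is a
--     maximum, and each subset can be assigned to a different bag whose capacity is no less than
--     the total weight of items in the subset.
--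
--     Input: weight/profit = {8, 3, 2}, weight_capacity = [10, 3]
--     Output: 13
--     8,2 can fit into knapsack with weight capacity 10 and 3 into the one with capacity 3
--     """
--
--     if len(capacities) != 2:
--         raise ValueError("2 knapsack capacities must be given")
--
--     if len(profits) != len(weights):
--         raise ValueError("Item value must have corresponding weight")
--
--     c1 = capacities[0]
--     c2 = capacities[1]
--
--     column_len = c1 + 1
--     row_len = c2 + 1
--     item_len = len(profits)
--     size = item_len + 1
--
--     dp = [[[0 for _ in range(column_len)] for _ in range(row_len)] for _ in range(size)]
--
--     # Every element in the first 2D matrix is the base case 0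
--     for i in range(1, size):
--         # Iterate through maximum capacity of bag 2
--         for j in range(row_len):
--             # Iterate through maximum capacity of bag 1
--             for k in range(column_len):
--                 current_item_weight, current_item_value = weights[i - 1], profits[i - 1]
--
--                 previous_item = dp[i-1][j][k]
--
--                 # If item can fit in either bag
--                 if current_item_weight <= j and current_item_weight <= k:
--                     # Find the bag in which it will maximize profit
--                     dp[i][j][k] = max(
--                         current_item_value + dp[i-1][j - current_item_weight][k],
--                         current_item_value + dp[i-1][j][k - current_item_weight],
--                         previous_item
--                     )
--                 # If item can fit in only bag 2
--                 elif current_item_weight <= j: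
--                     dp[i][j][k] = max(
--                         current_item_value + dp[i-1][j - current_item_weight][k],
--                         previous_item
--                     )
--                 # If item can fit in only bag 1
--                 elif current_item_weight <= k:
--                     dp[i][j][k] = max(
--                         current_item_value + dp[i-1][j][k - current_item_weight],
--                         previous_item
--                     )
--                 # If item cannot fit at all
--                 else:
--                     dp[i][j][k] = previous_item
--
--     return dp[item_len][c2][c1]
-- ===== SOURCE B (Python) =====
-- def func(profits, weights, capacities):
--     """Top-down dict-memoized recursion over the same recurrence as the 3D table."""
--     if len(capacities) != 2:
--         raise ValueError("2 knapsack capacities must be given")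
--
--     if len(profits) != len(weights):
--         raise ValueError("Item value must have corresponding weight")
--
--     c1 = capacities[0]
--     c2 = capacities[1]
--
--     memo = {}
--
--     # rec(i, j, k): best profit using the first i items with j capacity left in
--     # bag 2 and k capacity left in bag 1.
--     def rec(i, j, k):
--         if i == 0:
--             return 0
--         key = (i, j, k)
--         if key in memo:
--             return memo[key]
--         w = weights[i - 1]
--         p = profits[i - 1]
--         best = rec(i - 1, j, k)
--         if w <= j:
--             best = max(best, p + rec(i - 1, j - w, k))
--         if w <= k:
--             best = max(best, p + rec(i - 1, j, k - w))
--         memo[key] = best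
--         return best
--
--     return rec(len(profits), c2, c1)
-- ===== Notes on version B (the rewrite author's own statement) =====
-- stated objective: alternative
-- what changed: Replaces the bottom-up 3D table (filled for every (item, j, k) cell) by top-down dict-memoized recursion rec(i, j, k) over the same recurrence, which only evaluates states reachable from (n, c2, c1).
import Mathlib
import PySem

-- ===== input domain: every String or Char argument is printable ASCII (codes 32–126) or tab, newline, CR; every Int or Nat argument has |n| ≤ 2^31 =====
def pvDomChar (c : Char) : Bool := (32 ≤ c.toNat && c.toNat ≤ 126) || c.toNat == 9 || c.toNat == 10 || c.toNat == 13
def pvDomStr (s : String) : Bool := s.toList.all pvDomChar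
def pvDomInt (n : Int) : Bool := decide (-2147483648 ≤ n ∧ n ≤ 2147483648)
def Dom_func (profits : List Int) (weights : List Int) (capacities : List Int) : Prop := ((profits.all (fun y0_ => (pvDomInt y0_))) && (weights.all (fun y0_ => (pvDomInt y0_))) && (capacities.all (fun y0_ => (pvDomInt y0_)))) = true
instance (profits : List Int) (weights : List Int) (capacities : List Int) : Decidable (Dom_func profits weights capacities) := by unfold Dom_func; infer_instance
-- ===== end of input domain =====

-- B replaces A's bottom-up 3D DP table by top-down memoized recursion over the
-- same recurrence (objective: alternative decomposition; equal return values on Pre_).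

-- ===== PORT A =====
-- dp[i-1][j][k] style read of the previous 2D layer; on every Pre_ input all
-- indices used are nonnegative and in range, where .toNat is exact.
def pvGet2 (m : List (List Int)) (j k : Int) : Int :=
  (m.getD j.toNat []).getD k.toNat 0

-- the body of A's two inner loops: layer i of dp, each cell written once from layer i-1
def pvLayer (profits weights : List Int) (i row_len column_len : Nat)
    (prev : List (List Int)) : List (List Int) :=
  (List.range row_len).map (fun (jn : Nat) =>
    (List.range column_len).map (fun (kn : Nat) =>
      let j : Int := (jn : Int)
      let k : Int := (kn : Int)
      let current_item_weight := weights.getD (i - 1) 0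
      let current_item_value := profits.getD (i - 1) 0
      let previous_item := pvGet2 prev j k
      if current_item_weight ≤ j ∧ current_item_weight ≤ k then
        max (current_item_value + pvGet2 prev (j - current_item_weight) k)
          (max (current_item_value + pvGet2 prev j (k - current_item_weight)) previous_item)
      else if current_item_weight ≤ j then
        max (current_item_value + pvGet2 prev (j - current_item_weight) k) previous_item
      else if current_item_weight ≤ k then
        max (current_item_value + pvGet2 prev j (k - current_item_weight)) previous_item
      else previous_item))

def func (profits : List Int) (weights : List Int) (capacities : List Int) : Int :=
  if capacities.length ≠ 2 then 0            -- Python raises ValueError here: outside Pre_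
  else if profits.length ≠ weights.length then 0  -- Python raises ValueError here: outside Pre_
  else
    let c1 := capacities.getD 0 0
    let c2 := capacities.getD 1 0
    let column_len := (c1 + 1).toNat
    let row_len := (c2 + 1).toNat
    let item_len := profits.length
    let dp0 : List (List (List Int)) :=
      List.replicate (item_len + 1) (List.replicate row_len (List.replicate column_len 0))
    -- for i in range(1, size): dp[i] is written cell by cell from dp[i-1]
    let dp := (List.range' 1 item_len).foldl
      (fun dp i => dp.set i (pvLayer profits weights i row_len column_len (dp.getD (i - 1) []))) dp0
    pvGet2 (dp.getD item_len []) c2 c1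

-- ===== PORT B =====
-- rec(i, j, k) of Source B with its memo dict threaded explicitly through the calls
def funcRecM (profits weights : List Int) :
    Nat → Int → Int → PySem.Dict (Nat × Int × Int) Int → Int × PySem.Dict (Nat × Int × Int) Int
  | 0, _, _, memo => (0, memo)
  | i + 1, j, k, memo =>
    match memo.get? (i + 1, j, k) with
    | some v => (v, memo)
    | none =>
      let w := weights.getD i 0
      let p := profits.getD i 0
      let r0 := funcRecM profits weights i j k memo
      let r1 :=
        if w ≤ j then
          let r := funcRecM profits weights i (j - w) k r0.2
          (max r0.1 (p + r.1), r.2)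
        else r0
      let r2 :=
        if w ≤ k then
          let r := funcRecM profits weights i j (k - w) r1.2
          (max r1.1 (p + r.1), r.2)
        else r1
      (r2.1, r2.2.insert (i + 1, j, k) r2.1)

def func_alt (profits : List Int) (weights : List Int) (capacities : List Int) : Int :=
  if capacities.length ≠ 2 then 0            -- Source B raises ValueError here: outside Pre_
  else if profits.length ≠ weights.length then 0  -- Source B raises ValueError here: outside Pre_
  else
    let c1 := capacities.getD 0 0
    let c2 := capacities.getD 1 0
    (funcRecM profits weights profits.length c2 c1 PySem.Dict.empty).1

-- ===== PRECONDITION & SPEC =====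
-- Pre_ excludes exactly the inputs where A raises: capacities not of length 2 or
-- mismatched profits/weights lengths (ValueError), and negative capacities or any
-- negative item weight (IndexError while filling/reading the table).
def Pre_func (profits : List Int) (weights : List Int) (capacities : List Int) : Prop :=
  capacities.length = 2 ∧ profits.length = weights.length ∧
  0 ≤ capacities.getD 0 0 ∧ 0 ≤ capacities.getD 1 0 ∧ ∀ w ∈ weights, 0 ≤ w
instance (profits : List Int) (weights : List Int) (capacities : List Int) :
    Decidable (Pre_func profits weights capacities) := by unfold Pre_func; infer_instance

def pvWitness_func : List Int × List Int × List Int := ([8, 3, 2], [8, 3, 2], [10, 3])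

def Spec_func (profits : List Int) (weights : List Int) (capacities : List Int) (out : Int) : Prop := out = func_alt profits weights capacities
instance (profits : List Int) (weights : List Int) (capacities : List Int) (out : Int) : Decidable (Spec_func profits weights capacities out) := by unfold Spec_func; infer_instance

-- ===== CLAIM (what is proved, stated in full; the proofs are below) =====
def Claim_equal_func : Prop := ∀ (profits : List Int) (weights : List Int) (capacities : List Int), Dom_func profits weights capacities → Pre_func profits weights capacities → Spec_func profits weights capacities (func profits weights capacities)

-- ===== LEMMAS AND PROOFS =====

-- the common mathematical recurrence both programs compute
def pvR (profits weights : List Int) : Nat → Int → Int → Int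
  | 0, _, _ => 0
  | i + 1, j, k =>
    let w := weights.getD i 0
    let p := profits.getD i 0
    let b0 := pvR profits weights i j k
    let b1 := if w ≤ j then max b0 (p + pvR profits weights i (j - w) k) else b0
    if w ≤ k then max b1 (p + pvR profits weights i j (k - w)) else b1

-- all memo entries are correct values of pvR
def pvGood (profits weights : List Int) (memo : PySem.Dict (Nat × Int × Int) Int) : Prop :=
  ∀ q v, memo.get? q = some v → v = pvR profits weights q.1 q.2.1 q.2.2

theorem funcRecM_correct (profits weights : List Int) :
    ∀ (i : Nat) (j k : Int) (memo : PySem.Dict (Nat × Int × Int) Int),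
      pvGood profits weights memo →
      (funcRecM profits weights i j k memo).1 = pvR profits weights i j k ∧
      pvGood profits weights (funcRecM profits weights i j k memo).2 := by
  intro i
  induction i with
  | zero => intro j k memo h; exact ⟨rfl, h⟩
  | succ i ih =>
    intro j k memo h
    rw [funcRecM]
    cases hg : memo.get? (i + 1, j, k) with
    | some v =>
      exact ⟨h _ v hg, h⟩
    | none =>
      simp only
      obtain ⟨h0v, h0g⟩ := ih j k memo h
      set w := weights.getD i 0 with hw
      set p := profits.getD i 0 with hp
      set r0 := funcRecM profits weights i j k memo with hr0
      have h1 : (if w ≤ j then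
            let r := funcRecM profits weights i (j - w) k r0.2
            (max r0.1 (p + r.1), r.2)
          else r0).1 = (if w ≤ j then max (pvR profits weights i j k)
              (p + pvR profits weights i (j - w) k) else pvR profits weights i j k) ∧
          pvGood profits weights (if w ≤ j then
            let r := funcRecM profits weights i (j - w) k r0.2
            (max r0.1 (p + r.1), r.2)
          else r0).2 := by
        split
        · obtain ⟨hv, hgd⟩ := ih (j - w) k r0.2 h0g
          exact ⟨by simp [hv, h0v], hgd⟩
        · exact ⟨h0v, h0g⟩
      set r1 := (if w ≤ j then
            let r := funcRecM profits weights i (j - w) k r0.2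
            (max r0.1 (p + r.1), r.2)
          else r0) with hr1
      have h2 : (if w ≤ k then
            let r := funcRecM profits weights i j (k - w) r1.2
            (max r1.1 (p + r.1), r.2)
          else r1).1 = pvR profits weights (i + 1) j k ∧
          pvGood profits weights (if w ≤ k then
            let r := funcRecM profits weights i j (k - w) r1.2
            (max r1.1 (p + r.1), r.2)
          else r1).2 := by
        rw [pvR]
        split
        · obtain ⟨hv, hgd⟩ := ih j (k - w) r1.2 h1.2
          refine ⟨?_, hgd⟩
          simp only [hv, h1.1, ← hw, ← hp]
        · refine ⟨?_, h1.2⟩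
          simp only [h1.1, ← hw, ← hp]
      set r2 := (if w ≤ k then
            let r := funcRecM profits weights i j (k - w) r1.2
            (max r1.1 (p + r.1), r.2)
          else r1) with hr2
      refine ⟨h2.1, ?_⟩
      intro q v hq
      rcases PySem.Dict.get?_insert (d := r2.2) (k := (i + 1, j, k)) (v := r2.1) (k' := q) ▸ hq with hq'
      by_cases hc : q = (i + 1, j, k)
      · subst hc
        rw [if_pos rfl] at hq'
        cases hq'
        exact h2.1
      · simp only [if_neg hc] at hq'
        exact h2.2 q v hq'

-- ---------- A-side ----------

-- the sequence of 2D layers A computes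
def pvL (profits weights : List Int) (row_len column_len : Nat) : Nat → List (List Int)
  | 0 => List.replicate row_len (List.replicate column_len 0)
  | i + 1 => pvLayer profits weights (i + 1) row_len column_len
      (pvL profits weights row_len column_len i)

theorem getD_replicate' {α : Type} (n m : Nat) (a dflt : α) (h : m < n) :
    (List.replicate n a).getD m dflt = a := by
  rw [List.getD_eq_getElem?_getD, List.getElem?_replicate, if_pos h]
  rfl

theorem getD_map_range {α : Type} (n m : Nat) (f : Nat → α) (dflt : α) (h : m < n) :
    ((List.range n).map f).getD m dflt = f m := by
  rw [List.getD_eq_getElem?_getD, List.getElem?_map, List.getElem?_range h]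
  rfl

-- cells of layer i are the recurrence values (needs nonnegative weights for the index arithmetic)
theorem pvL_get (profits weights : List Int) (row_len column_len : Nat)
    (hw : ∀ m, 0 ≤ weights.getD m 0) :
    ∀ (i : Nat) (j k : Int), 0 ≤ j → 0 ≤ k → j.toNat < row_len → k.toNat < column_len →
      pvGet2 (pvL profits weights row_len column_len i) j k = pvR profits weights i j k := by
  intro i
  induction i with
  | zero =>
    intro j k _ _ hj hk
    unfold pvL pvGet2
    rw [getD_replicate' _ _ _ _ hj, getD_replicate' _ _ _ _ hk]
    rfl
  | succ i ih =>
    intro j k hj0 hk0 hj hk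
    have hji : (j.toNat : Int) = j := Int.toNat_of_nonneg hj0
    have hki : (k.toNat : Int) = k := Int.toNat_of_nonneg hk0
    rw [pvL]
    unfold pvGet2 pvLayer
    rw [getD_map_range _ _ _ _ hj]
    rw [getD_map_range _ _ _ _ hk]
    simp only [hji, hki]
    have hwi := hw i
    rw [pvR]
    simp only [Nat.add_sub_cancel]
    by_cases h1 : weights.getD i 0 ≤ j <;> by_cases h2 : weights.getD i 0 ≤ k
    · rw [if_pos ⟨h1, h2⟩]
      rw [ih j k hj0 hk0 hj hk,
        ih (j - weights.getD i 0) k (by omega) hk0 (by omega) hk,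
        ih j (k - weights.getD i 0) hj0 (by omega) hj (by omega)]
      rw [if_pos h1, if_pos h2]
      omega
    · rw [if_neg (by tauto), if_pos h1]
      rw [ih j k hj0 hk0 hj hk,
        ih (j - weights.getD i 0) k (by omega) hk0 (by omega) hk]
      rw [if_pos h1, if_neg h2]
      omega
    · rw [if_neg (by tauto), if_neg h1, if_pos h2]
      rw [ih j k hj0 hk0 hj hk,
        ih j (k - weights.getD i 0) hj0 (by omega) hj (by omega)]
      rw [if_neg h1, if_pos h2]
      omega
    · rw [if_neg (by tauto), if_neg h1, if_neg h2]
      rw [ih j k hj0 hk0 hj hk, if_neg h1, if_neg h2]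

-- the fold writes layer t at position t
theorem func_fold (profits weights : List Int) (row_len column_len : Nat) (n : Nat) :
    ∀ (t : Nat), t ≤ n →
      (((List.range' 1 t).foldl
        (fun dp i => dp.set i (pvLayer profits weights i row_len column_len (dp.getD (i - 1) [])))
        (List.replicate (n + 1) (List.replicate row_len (List.replicate column_len (0 : Int)))))).length = n + 1 ∧
      (((List.range' 1 t).foldl
        (fun dp i => dp.set i (pvLayer profits weights i row_len column_len (dp.getD (i - 1) [])))
        (List.replicate (n + 1) (List.replicate row_len (List.replicate column_len (0 : Int)))))).getD t []
        = pvL profits weights row_len column_len t := by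
  intro t
  induction t with
  | zero =>
    intro _
    constructor
    · simp
    · exact getD_replicate' (n + 1) 0 (List.replicate row_len (List.replicate column_len (0 : Int))) [] (by omega)
  | succ t ih =>
    intro ht
    obtain ⟨hlen, hget⟩ := ih (by omega)
    have hrange : List.range' 1 (t + 1) = List.range' 1 t ++ [1 + t] := List.range'_1_concat
    rw [hrange, List.foldl_append]
    simp only [List.foldl_cons, List.foldl_nil]
    constructor
    · rw [List.length_set, hlen]
    · rw [show 1 + t - 1 = t by omega]
      rw [List.getD_eq_getElem?_getD, show 1 + t = t + 1 by omega,
        List.getElem?_set_self (by omega), hget]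
      simp [pvL]

theorem func_spec' (profits weights capacities : List Int)
    (h : Pre_func profits weights capacities) :
    func profits weights capacities = func_alt profits weights capacities := by
  obtain ⟨hc, hl, hc1, hc2, hwpos⟩ := h
  have hw : ∀ m, 0 ≤ weights.getD m 0 := by
    intro m
    by_cases hm : m < weights.length
    · rw [List.getD_eq_getElem?_getD, List.getElem?_eq_getElem hm]
      exact hwpos _ (List.getElem_mem hm)
    · simp [List.getD_eq_getElem?_getD, List.getElem?_eq_none (show weights.length ≤ m by omega)]
  rw [func, func_alt, if_neg (by omega), if_neg (by omega), if_neg (by omega), if_neg (by omega)]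
  simp only
  obtain ⟨_, hget⟩ := func_fold profits weights ((capacities.getD 1 0 + 1).toNat)
    ((capacities.getD 0 0 + 1).toNat) profits.length profits.length le_rfl
  rw [hget]
  rw [pvL_get profits weights _ _ hw profits.length (capacities.getD 1 0) (capacities.getD 0 0)
    hc2 hc1 (by omega) (by omega)]
  have := funcRecM_correct profits weights profits.length (capacities.getD 1 0)
    (capacities.getD 0 0) PySem.Dict.empty (by intro q v hq; simp [PySem.Dict.get?_empty] at hq)
  exact this.1.symm

-- ===== VERDICT (by name: the statement is the Claim_ definition above) =====
theorem func_spec : Claim_equal_func := by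
  intro profits weights capacities _ hpre
  unfold Spec_func
  exact func_spec' profits weights capacities hpre
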